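-- pv_equiv track=rewrite | github.com/canelhasmateus/dot | software/a.py | alternate_directional_key
-- ===== SOURCE A (Python) =====
-- import enum
--
-- String = str
--
-- class Directionals( enum.Enum ):
-- 	UP = "up"
-- 	LEFT = "left"
-- 	DOWN = "down"
-- 	RIGHT = "right"
--
-- def alternate_directional_key( bind: String ) -> String:
-- 	if "alt" not in bind:
--
-- 		mapping = {
-- 				Directionals.DOWN.value : "alt+k",
-- 				Directionals.UP.value   : "alt+i",
-- 				Directionals.LEFT.value : "alt+j",
-- 				Directionals.RIGHT.value: "alt+l",
-- 				}
--
-- 		for key, value in mapping.items():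
-- 			bind = bind.replace( key, value )
--
-- 	return bind
-- ===== SOURCE B (Python) =====
-- def alternate_directional_key(bind):
--     if "alt" in bind:
--         return bind
--     mapping = {
--         "up": "alt+i",
--         "down": "alt+k",
--         "left": "alt+j",
--         "right": "alt+l",
--     }
--     out = []
--     i = 0
--     while i < len(bind):
--         for word, repl in mapping.items():
--             if bind.startswith(word, i):
--                 out.append(repl)
--                 i += len(word)
--                 break
--         else:
--             out.append(bind[i])
--             i += 1
--     return "".join(out)
-- ===== Notes on version B (the rewrite author's own statement) =====
-- stated objective: alternative
-- what changed: A makes four sequential full-string str.replace passes (one per direction word); B does one left-to-right scan that at each position matches a direction word against a word-to-alt-binding table and emits its replacement or copies the character.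
import Mathlib
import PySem

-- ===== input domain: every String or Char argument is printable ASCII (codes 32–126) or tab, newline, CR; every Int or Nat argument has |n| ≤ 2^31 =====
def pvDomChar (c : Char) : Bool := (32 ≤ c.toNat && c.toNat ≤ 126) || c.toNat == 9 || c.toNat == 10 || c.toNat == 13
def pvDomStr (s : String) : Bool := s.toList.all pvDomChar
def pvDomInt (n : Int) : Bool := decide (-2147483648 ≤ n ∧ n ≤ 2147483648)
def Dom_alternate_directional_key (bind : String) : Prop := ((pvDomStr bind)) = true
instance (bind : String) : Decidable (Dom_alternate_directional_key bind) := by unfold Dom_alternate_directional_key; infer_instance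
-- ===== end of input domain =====

-- B replaces A's four sequential full-string replace passes by one left-to-right scan with a
-- word → alt-binding table (objective: alternative single-pass algorithm, same exact output).

-- ===== PORT A =====
def alternate_directional_key (bind : String) : String :=
  if !(PySem.Str.isIn "alt" bind) then
    let b1 := PySem.Str.replace bind "down" "alt+k"
    let b2 := PySem.Str.replace b1 "up" "alt+i"
    let b3 := PySem.Str.replace b2 "left" "alt+j"
    let b4 := PySem.Str.replace b3 "right" "alt+l"
    b4
  else bind

-- ===== PORT B =====
-- Source B's single scan: at each position try the four direction words (the loop over the
-- mapping table, one arm per entry); on a match emit its alt-binding and skip the word,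
-- otherwise copy one character.
def scanDirections : List Char → List Char
  | 'u'::'p'::t => 'a'::'l'::'t'::'+'::'i'::scanDirections t
  | 'd'::'o'::'w'::'n'::t => 'a'::'l'::'t'::'+'::'k'::scanDirections t
  | 'l'::'e'::'f'::'t'::t => 'a'::'l'::'t'::'+'::'j'::scanDirections t
  | 'r'::'i'::'g'::'h'::'t'::t => 'a'::'l'::'t'::'+'::'l'::scanDirections t
  | c :: t => c :: scanDirections t
  | [] => []

def alternate_directional_key_alt (bind : String) : String :=
  if !(PySem.Str.isIn "alt" bind) then String.ofList (scanDirections bind.toList)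
  else bind

-- ===== PRECONDITION & SPEC =====
def Spec_alternate_directional_key (bind : String) (out : String) : Prop := out = alternate_directional_key_alt bind
instance (bind : String) (out : String) : Decidable (Spec_alternate_directional_key bind out) := by unfold Spec_alternate_directional_key; infer_instance

-- ===== CLAIM (what is proved, stated in full; the proofs are below) =====
def Claim_equal_alternate_directional_key : Prop := ∀ (bind : String), Dom_alternate_directional_key bind → Spec_alternate_directional_key bind (alternate_directional_key bind)

-- ===== LEMMAS AND PROOFS =====

-- head-step characterisation of Python str.replace (PySem.Chars.replace):
-- fuel/accumulator normalisation of its worker, then the three unfolding equations.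
theorem go_norm (old new : List Char) (hne : old ≠ []) :
    ∀ fuel l acc, l.length ≤ fuel →
      PySem.Chars.replace.go old new fuel l acc = acc.reverse ++ PySem.Chars.replace.go old new l.length l [] := by
  intro fuel
  induction fuel using Nat.strong_induction_on with
  | _ fuel ih =>
    intro l acc h
    match fuel, l with
    | 0, l =>
      have : l = [] := List.eq_nil_of_length_eq_zero (Nat.le_zero.mp h)
      subst this; simp [PySem.Chars.replace.go]
    | n+1, [] => simp [PySem.Chars.replace.go]
    | n+1, c :: t =>
      have hold : 1 ≤ old.length := List.length_pos_iff.mpr hne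
      rw [PySem.Chars.replace.go]
      simp only [List.length_cons]
      conv_rhs => rw [PySem.Chars.replace.go]
      have ht : t.length ≤ n := by simpa using h
      by_cases hp : old.isPrefixOf (c :: t)
      · simp only [hp, if_true]
        have hlen : ((c :: t).drop old.length).length ≤ n := by
          simp [List.length_drop]; omega
        rw [ih n (by omega) _ _ hlen,
            ih t.length (by omega) _ _ (by simp [List.length_drop]; omega)]
        simp
      · simp only [hp]
        rw [ih n (by omega) t (c :: acc) ht, ih t.length (by omega) t [c] (by simp)]
        simp

theorem rep_nil (old new : List Char) (hne : old ≠ []) :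
    PySem.Chars.replace [] old new = [] := by
  simp [PySem.Chars.replace, List.isEmpty_eq_false_iff.mpr hne, PySem.Chars.replace.go]

theorem rep_pos (old new l : List Char) (hne : old ≠ []) (hp : old.isPrefixOf l = true) :
    PySem.Chars.replace l old new = new ++ PySem.Chars.replace (l.drop old.length) old new := by
  have hold : 1 ≤ old.length := List.length_pos_iff.mpr hne
  match l with
  | [] =>
    exfalso
    have := List.isPrefixOf_iff_prefix.mp hp
    simp [List.prefix_nil] at this; exact hne this
  | c :: t =>
    simp only [PySem.Chars.replace, List.isEmpty_eq_false_iff.mpr hne, if_false,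
      Bool.false_eq_true]
    simp only [List.length_cons]
    rw [PySem.Chars.replace.go]
    simp only [hp, if_true]
    rw [go_norm old new hne _ _ _ (by simp [List.length_drop]; omega)]
    simp

theorem rep_neg (old new : List Char) (c : Char) (t : List Char) (hne : old ≠ [])
    (hp : old.isPrefixOf (c :: t) = false) :
    PySem.Chars.replace (c :: t) old new = c :: PySem.Chars.replace t old new := by
  simp only [PySem.Chars.replace, List.isEmpty_eq_false_iff.mpr hne, if_false,
    Bool.false_eq_true]
  simp only [List.length_cons]
  rw [PySem.Chars.replace.go]
  simp only [hp, if_false, Bool.false_eq_true]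
  rw [go_norm old new hne _ _ _ (by simp)]
  simp


-- intermediate scans: the string after the first one / two / three replace passes of A,
-- expressed as a single left-to-right scan (proof-only helpers).
def scan1 : List Char → List Char
  | 'd'::'o'::'w'::'n'::t => 'a'::'l'::'t'::'+'::'k'::scan1 t
  | c :: t => c :: scan1 t
  | [] => []

def scan2 : List Char → List Char
  | 'd'::'o'::'w'::'n'::t => 'a'::'l'::'t'::'+'::'k'::scan2 t
  | 'u'::'p'::t => 'a'::'l'::'t'::'+'::'i'::scan2 t
  | c :: t => c :: scan2 t
  | [] => []

def scan3 : List Char → List Char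
  | 'd'::'o'::'w'::'n'::t => 'a'::'l'::'t'::'+'::'k'::scan3 t
  | 'u'::'p'::t => 'a'::'l'::'t'::'+'::'i'::scan3 t
  | 'l'::'e'::'f'::'t'::t => 'a'::'l'::'t'::'+'::'j'::scan3 t
  | c :: t => c :: scan3 t
  | [] => []

theorem scan1_cons (c : Char) (t : List Char)
    (hd : ['d','o','w','n'].isPrefixOf (c :: t) = false) :
    scan1 (c :: t) = c :: scan1 t := by
  rw [scan1.eq_def]; split <;> simp_all [List.isPrefixOf]

theorem scan2_cons (c : Char) (t : List Char)
    (hd : ['d','o','w','n'].isPrefixOf (c :: t) = false)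
    (hu : ['u','p'].isPrefixOf (c :: t) = false) :
    scan2 (c :: t) = c :: scan2 t := by
  rw [scan2.eq_def]; split <;> simp_all [List.isPrefixOf]

theorem scan3_cons (c : Char) (t : List Char)
    (hd : ['d','o','w','n'].isPrefixOf (c :: t) = false)
    (hu : ['u','p'].isPrefixOf (c :: t) = false)
    (hl : ['l','e','f','t'].isPrefixOf (c :: t) = false) :
    scan3 (c :: t) = c :: scan3 t := by
  rw [scan3.eq_def]; split <;> simp_all [List.isPrefixOf]

theorem scanDirections_cons (c : Char) (t : List Char)
    (hd : ['d','o','w','n'].isPrefixOf (c :: t) = false)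
    (hu : ['u','p'].isPrefixOf (c :: t) = false)
    (hl : ['l','e','f','t'].isPrefixOf (c :: t) = false)
    (hr : ['r','i','g','h','t'].isPrefixOf (c :: t) = false) :
    scanDirections (c :: t) = c :: scanDirections t := by
  rw [scanDirections.eq_def]; split <;> simp_all [List.isPrefixOf]


-- a word none of whose characters can start or occur inside an emitted chunk is a prefix of
-- the scanned string only if it was a prefix of the original string (no later match
-- straddles a replacement boundary).
theorem reflect1 :
    ∀ (n : Nat) (w t : List Char), t.length ≤ n → (∀ c ∈ w, c ≠ 'a' ∧ c ≠ 'd') →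
      w.isPrefixOf (scan1 t) = true → w.isPrefixOf t = true := by
  intro n
  induction n with
  | zero =>
    intro w t ht hw h
    have : t = [] := List.eq_nil_of_length_eq_zero (Nat.le_zero.mp ht)
    subst this; simpa [scan1] using h
  | succ n ih =>
    intro w t ht hw h
    match w with
    | [] => simp [List.isPrefixOf]
    | x :: w' =>
      match t with
      | [] => simp [scan1, List.isPrefixOf] at h
      | c :: t' =>
        by_cases hd : ['d','o','w','n'].isPrefixOf (c :: t')
        · obtain ⟨t2, heq⟩ := List.isPrefixOf_iff_prefix.mp hd
          simp only [List.cons_append, List.nil_append, List.cons.injEq] at heq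
          obtain ⟨h1, h2⟩ := heq
          subst h1; subst h2
          have : scan1 ('d'::'o'::'w'::'n'::t2) = 'a'::'l'::'t'::'+'::'k'::scan1 t2 := rfl
          rw [this] at h
          simp only [List.isPrefixOf, Bool.and_eq_true, beq_iff_eq] at h
          exact absurd h.1 (hw x (by simp)).1
        · rw [scan1_cons c t' (Bool.eq_false_iff.mpr hd)] at h
          simp only [List.isPrefixOf, Bool.and_eq_true] at h ⊢
          exact ⟨h.1, ih w' t' (by simpa using ht) (fun c hc => hw c (by simp [hc])) h.2⟩

theorem reflect2 :
    ∀ (n : Nat) (w t : List Char), t.length ≤ n → (∀ c ∈ w, c ≠ 'a' ∧ c ≠ 'd' ∧ c ≠ 'u') →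
      w.isPrefixOf (scan2 t) = true → w.isPrefixOf t = true := by
  intro n
  induction n with
  | zero =>
    intro w t ht hw h
    have : t = [] := List.eq_nil_of_length_eq_zero (Nat.le_zero.mp ht)
    subst this; simpa [scan2] using h
  | succ n ih =>
    intro w t ht hw h
    match w with
    | [] => simp [List.isPrefixOf]
    | x :: w' =>
      match t with
      | [] => simp [scan2, List.isPrefixOf] at h
      | c :: t' =>
        by_cases hd : ['d','o','w','n'].isPrefixOf (c :: t')
        · obtain ⟨t2, heq⟩ := List.isPrefixOf_iff_prefix.mp hd
          simp only [List.cons_append, List.nil_append, List.cons.injEq] at heq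
          obtain ⟨h1, h2⟩ := heq
          subst h1; subst h2
          have : scan2 ('d'::'o'::'w'::'n'::t2) = 'a'::'l'::'t'::'+'::'k'::scan2 t2 := rfl
          rw [this] at h
          simp only [List.isPrefixOf, Bool.and_eq_true, beq_iff_eq] at h
          exact absurd h.1 (hw x (by simp)).1
        · by_cases hu : ['u','p'].isPrefixOf (c :: t')
          · obtain ⟨t2, heq⟩ := List.isPrefixOf_iff_prefix.mp hu
            simp only [List.cons_append, List.nil_append, List.cons.injEq] at heq
            obtain ⟨h1, h2⟩ := heq
            subst h1; subst h2
            have : scan2 ('u'::'p'::t2) = 'a'::'l'::'t'::'+'::'i'::scan2 t2 := rfl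
            rw [this] at h
            simp only [List.isPrefixOf, Bool.and_eq_true, beq_iff_eq] at h
            exact absurd h.1 (hw x (by simp)).1
          · rw [scan2_cons c t' (Bool.eq_false_iff.mpr hd) (Bool.eq_false_iff.mpr hu)] at h
            simp only [List.isPrefixOf, Bool.and_eq_true] at h ⊢
            exact ⟨h.1, ih w' t' (by simpa using ht) (fun c hc => hw c (by simp [hc])) h.2⟩

theorem reflect3 :
    ∀ (n : Nat) (w t : List Char), t.length ≤ n →
      (∀ c ∈ w, c ≠ 'a' ∧ c ≠ 'd' ∧ c ≠ 'u' ∧ c ≠ 'l') →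
      w.isPrefixOf (scan3 t) = true → w.isPrefixOf t = true := by
  intro n
  induction n with
  | zero =>
    intro w t ht hw h
    have : t = [] := List.eq_nil_of_length_eq_zero (Nat.le_zero.mp ht)
    subst this; simpa [scan3] using h
  | succ n ih =>
    intro w t ht hw h
    match w with
    | [] => simp [List.isPrefixOf]
    | x :: w' =>
      match t with
      | [] => simp [scan3, List.isPrefixOf] at h
      | c :: t' =>
        by_cases hd : ['d','o','w','n'].isPrefixOf (c :: t')
        · obtain ⟨t2, heq⟩ := List.isPrefixOf_iff_prefix.mp hd
          simp only [List.cons_append, List.nil_append, List.cons.injEq] at heq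
          obtain ⟨h1, h2⟩ := heq
          subst h1; subst h2
          have : scan3 ('d'::'o'::'w'::'n'::t2) = 'a'::'l'::'t'::'+'::'k'::scan3 t2 := rfl
          rw [this] at h
          simp only [List.isPrefixOf, Bool.and_eq_true, beq_iff_eq] at h
          exact absurd h.1 (hw x (by simp)).1
        · by_cases hu : ['u','p'].isPrefixOf (c :: t')
          · obtain ⟨t2, heq⟩ := List.isPrefixOf_iff_prefix.mp hu
            simp only [List.cons_append, List.nil_append, List.cons.injEq] at heq
            obtain ⟨h1, h2⟩ := heq
            subst h1; subst h2
            have : scan3 ('u'::'p'::t2) = 'a'::'l'::'t'::'+'::'i'::scan3 t2 := rfl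
            rw [this] at h
            simp only [List.isPrefixOf, Bool.and_eq_true, beq_iff_eq] at h
            exact absurd h.1 (hw x (by simp)).1
          · by_cases hl : ['l','e','f','t'].isPrefixOf (c :: t')
            · obtain ⟨t2, heq⟩ := List.isPrefixOf_iff_prefix.mp hl
              simp only [List.cons_append, List.nil_append, List.cons.injEq] at heq
              obtain ⟨h1, h2⟩ := heq
              subst h1; subst h2
              have : scan3 ('l'::'e'::'f'::'t'::t2) = 'a'::'l'::'t'::'+'::'j'::scan3 t2 := rfl
              rw [this] at h
              simp only [List.isPrefixOf, Bool.and_eq_true, beq_iff_eq] at h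
              exact absurd h.1 (hw x (by simp)).1
            · rw [scan3_cons c t' (Bool.eq_false_iff.mpr hd) (Bool.eq_false_iff.mpr hu)
                (Bool.eq_false_iff.mpr hl)] at h
              simp only [List.isPrefixOf, Bool.and_eq_true] at h ⊢
              exact ⟨h.1, ih w' t' (by simpa using ht) (fun c hc => hw c (by simp [hc])) h.2⟩

-- each replace pass turns the previous scan into the next one
theorem stage1 :
    ∀ (n : Nat) (l : List Char), l.length ≤ n →
      PySem.Chars.replace l ['d','o','w','n'] ['a','l','t','+','k'] = scan1 l := by
  intro n
  induction n with
  | zero =>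
    intro l hl
    have : l = [] := List.eq_nil_of_length_eq_zero (Nat.le_zero.mp hl)
    subst this; rw [rep_nil _ _ (by decide)]; rfl
  | succ n ih =>
    intro l hl
    match l with
    | [] => rw [rep_nil _ _ (by decide)]; rfl
    | c :: t =>
      by_cases hd : ['d','o','w','n'].isPrefixOf (c :: t)
      · obtain ⟨t2, heq⟩ := List.isPrefixOf_iff_prefix.mp hd
        simp only [List.cons_append, List.nil_append, List.cons.injEq] at heq
        obtain ⟨h1, h2⟩ := heq
        subst h1; subst h2
        rw [rep_pos _ _ _ (by decide) (by simp [List.isPrefixOf])]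
        simp only [List.length_cons, List.length_nil, List.drop_succ_cons, List.drop_zero]
        rw [ih t2 (by simp at hl; omega)]
        rfl
      · rw [rep_neg _ _ _ _ (by decide) (Bool.eq_false_iff.mpr hd),
            ih t (by simp at hl; omega), scan1_cons c t (Bool.eq_false_iff.mpr hd)]

theorem stage2 :
    ∀ (n : Nat) (l : List Char), l.length ≤ n →
      PySem.Chars.replace (scan1 l) ['u','p'] ['a','l','t','+','i'] = scan2 l := by
  intro n
  induction n with
  | zero =>
    intro l hl
    have : l = [] := List.eq_nil_of_length_eq_zero (Nat.le_zero.mp hl)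
    subst this; rw [show scan1 [] = [] from rfl, rep_nil _ _ (by decide)]; rfl
  | succ n ih =>
    intro l hl
    match l with
    | [] => rw [show scan1 [] = [] from rfl, rep_nil _ _ (by decide)]; rfl
    | c :: t =>
      by_cases hd : ['d','o','w','n'].isPrefixOf (c :: t)
      · obtain ⟨t2, heq⟩ := List.isPrefixOf_iff_prefix.mp hd
        simp only [List.cons_append, List.nil_append, List.cons.injEq] at heq
        obtain ⟨h1, h2⟩ := heq
        subst h1; subst h2
        rw [show scan1 ('d'::'o'::'w'::'n'::t2) = 'a'::'l'::'t'::'+'::'k'::scan1 t2 from rfl]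
        rw [rep_neg _ _ _ _ (by decide) (by simp [List.isPrefixOf]),
            rep_neg _ _ _ _ (by decide) (by simp [List.isPrefixOf]),
            rep_neg _ _ _ _ (by decide) (by simp [List.isPrefixOf]),
            rep_neg _ _ _ _ (by decide) (by simp [List.isPrefixOf]),
            rep_neg _ _ _ _ (by decide) (by simp [List.isPrefixOf]),
            ih t2 (by simp at hl; omega)]
        rfl
      · by_cases hu : ['u','p'].isPrefixOf (c :: t)
        · obtain ⟨t2, heq⟩ := List.isPrefixOf_iff_prefix.mp hu
          simp only [List.cons_append, List.nil_append, List.cons.injEq] at heq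
          obtain ⟨h1, h2⟩ := heq
          subst h1; subst h2
          rw [scan1_cons _ _ (by simp [List.isPrefixOf]),
              scan1_cons _ _ (by simp [List.isPrefixOf]),
              rep_pos _ _ _ (by decide) (by simp [List.isPrefixOf])]
          simp only [List.length_cons, List.length_nil, List.drop_succ_cons, List.drop_zero]
          rw [ih t2 (by simp at hl; omega)]
          rfl
        · have hup' : ['u','p'].isPrefixOf (c :: scan1 t) = false := by
            rw [Bool.eq_false_iff]
            intro hcon
            simp only [List.isPrefixOf, Bool.and_eq_true, beq_iff_eq] at hcon
            have := reflect1 t.length ['p'] t (Nat.le_refl _) (by simp) hcon.2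
            apply hu
            simp only [List.isPrefixOf, Bool.and_eq_true, beq_iff_eq]
            exact ⟨hcon.1, this⟩
          rw [scan1_cons c t (Bool.eq_false_iff.mpr hd),
              rep_neg _ _ _ _ (by decide) hup',
              ih t (by simp at hl; omega),
              scan2_cons c t (Bool.eq_false_iff.mpr hd) (Bool.eq_false_iff.mpr hu)]

theorem stage3 :
    ∀ (n : Nat) (l : List Char), l.length ≤ n →
      PySem.Chars.replace (scan2 l) ['l','e','f','t'] ['a','l','t','+','j'] = scan3 l := by
  intro n
  induction n with
  | zero =>
    intro l hl
    have : l = [] := List.eq_nil_of_length_eq_zero (Nat.le_zero.mp hl)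
    subst this; rw [show scan2 [] = [] from rfl, rep_nil _ _ (by decide)]; rfl
  | succ n ih =>
    intro l hl
    match l with
    | [] => rw [show scan2 [] = [] from rfl, rep_nil _ _ (by decide)]; rfl
    | c :: t =>
      by_cases hd : ['d','o','w','n'].isPrefixOf (c :: t)
      · obtain ⟨t2, heq⟩ := List.isPrefixOf_iff_prefix.mp hd
        simp only [List.cons_append, List.nil_append, List.cons.injEq] at heq
        obtain ⟨h1, h2⟩ := heq
        subst h1; subst h2
        rw [show scan2 ('d'::'o'::'w'::'n'::t2) = 'a'::'l'::'t'::'+'::'k'::scan2 t2 from rfl]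
        rw [rep_neg _ _ _ _ (by decide) (by simp [List.isPrefixOf]),
            rep_neg _ _ _ _ (by decide) (by simp [List.isPrefixOf]),
            rep_neg _ _ _ _ (by decide) (by simp [List.isPrefixOf]),
            rep_neg _ _ _ _ (by decide) (by simp [List.isPrefixOf]),
            rep_neg _ _ _ _ (by decide) (by simp [List.isPrefixOf]),
            ih t2 (by simp at hl; omega)]
        rfl
      · by_cases hu : ['u','p'].isPrefixOf (c :: t)
        · obtain ⟨t2, heq⟩ := List.isPrefixOf_iff_prefix.mp hu
          simp only [List.cons_append, List.nil_append, List.cons.injEq] at heq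
          obtain ⟨h1, h2⟩ := heq
          subst h1; subst h2
          rw [show scan2 ('u'::'p'::t2) = 'a'::'l'::'t'::'+'::'i'::scan2 t2 from rfl]
          rw [rep_neg _ _ _ _ (by decide) (by simp [List.isPrefixOf]),
              rep_neg _ _ _ _ (by decide) (by simp [List.isPrefixOf]),
              rep_neg _ _ _ _ (by decide) (by simp [List.isPrefixOf]),
              rep_neg _ _ _ _ (by decide) (by simp [List.isPrefixOf]),
              rep_neg _ _ _ _ (by decide) (by simp [List.isPrefixOf]),
              ih t2 (by simp at hl; omega)]
          rfl
        · by_cases hle : ['l','e','f','t'].isPrefixOf (c :: t)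
          · obtain ⟨t2, heq⟩ := List.isPrefixOf_iff_prefix.mp hle
            simp only [List.cons_append, List.nil_append, List.cons.injEq] at heq
            obtain ⟨h1, h2⟩ := heq
            subst h1; subst h2
            rw [scan2_cons _ _ (by simp [List.isPrefixOf]) (by simp [List.isPrefixOf]),
                scan2_cons _ _ (by simp [List.isPrefixOf]) (by simp [List.isPrefixOf]),
                scan2_cons _ _ (by simp [List.isPrefixOf]) (by simp [List.isPrefixOf]),
                scan2_cons _ _ (by simp [List.isPrefixOf]) (by simp [List.isPrefixOf]),
                rep_pos _ _ _ (by decide) (by simp [List.isPrefixOf])]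
            simp only [List.length_cons, List.length_nil, List.drop_succ_cons, List.drop_zero]
            rw [ih t2 (by simp at hl; omega)]
            rfl
          · have hleft' : ['l','e','f','t'].isPrefixOf (c :: scan2 t) = false := by
              rw [Bool.eq_false_iff]
              intro hcon
              simp only [List.isPrefixOf, Bool.and_eq_true, beq_iff_eq] at hcon
              have := reflect2 t.length ['e','f','t'] t (Nat.le_refl _) (by simp) hcon.2
              apply hle
              simp only [List.isPrefixOf, Bool.and_eq_true, beq_iff_eq]
              exact ⟨hcon.1, this⟩
            rw [scan2_cons c t (Bool.eq_false_iff.mpr hd) (Bool.eq_false_iff.mpr hu),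
                rep_neg _ _ _ _ (by decide) hleft',
                ih t (by simp at hl; omega),
                scan3_cons c t (Bool.eq_false_iff.mpr hd) (Bool.eq_false_iff.mpr hu)
                  (Bool.eq_false_iff.mpr hle)]

theorem stage4 :
    ∀ (n : Nat) (l : List Char), l.length ≤ n →
      PySem.Chars.replace (scan3 l) ['r','i','g','h','t'] ['a','l','t','+','l'] = scanDirections l := by
  intro n
  induction n with
  | zero =>
    intro l hl
    have : l = [] := List.eq_nil_of_length_eq_zero (Nat.le_zero.mp hl)
    subst this; rw [show scan3 [] = [] from rfl, rep_nil _ _ (by decide)]; rfl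
  | succ n ih =>
    intro l hl
    match l with
    | [] => rw [show scan3 [] = [] from rfl, rep_nil _ _ (by decide)]; rfl
    | c :: t =>
      by_cases hd : ['d','o','w','n'].isPrefixOf (c :: t)
      · obtain ⟨t2, heq⟩ := List.isPrefixOf_iff_prefix.mp hd
        simp only [List.cons_append, List.nil_append, List.cons.injEq] at heq
        obtain ⟨h1, h2⟩ := heq
        subst h1; subst h2
        rw [show scan3 ('d'::'o'::'w'::'n'::t2) = 'a'::'l'::'t'::'+'::'k'::scan3 t2 from rfl]
        rw [rep_neg _ _ _ _ (by decide) (by simp [List.isPrefixOf]),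
            rep_neg _ _ _ _ (by decide) (by simp [List.isPrefixOf]),
            rep_neg _ _ _ _ (by decide) (by simp [List.isPrefixOf]),
            rep_neg _ _ _ _ (by decide) (by simp [List.isPrefixOf]),
            rep_neg _ _ _ _ (by decide) (by simp [List.isPrefixOf]),
            ih t2 (by simp at hl; omega)]
        rfl
      · by_cases hu : ['u','p'].isPrefixOf (c :: t)
        · obtain ⟨t2, heq⟩ := List.isPrefixOf_iff_prefix.mp hu
          simp only [List.cons_append, List.nil_append, List.cons.injEq] at heq
          obtain ⟨h1, h2⟩ := heq
          subst h1; subst h2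
          rw [show scan3 ('u'::'p'::t2) = 'a'::'l'::'t'::'+'::'i'::scan3 t2 from rfl]
          rw [rep_neg _ _ _ _ (by decide) (by simp [List.isPrefixOf]),
              rep_neg _ _ _ _ (by decide) (by simp [List.isPrefixOf]),
              rep_neg _ _ _ _ (by decide) (by simp [List.isPrefixOf]),
              rep_neg _ _ _ _ (by decide) (by simp [List.isPrefixOf]),
              rep_neg _ _ _ _ (by decide) (by simp [List.isPrefixOf]),
              ih t2 (by simp at hl; omega)]
          rfl
        · by_cases hle : ['l','e','f','t'].isPrefixOf (c :: t)
          · obtain ⟨t2, heq⟩ := List.isPrefixOf_iff_prefix.mp hle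
            simp only [List.cons_append, List.nil_append, List.cons.injEq] at heq
            obtain ⟨h1, h2⟩ := heq
            subst h1; subst h2
            rw [show scan3 ('l'::'e'::'f'::'t'::t2) = 'a'::'l'::'t'::'+'::'j'::scan3 t2 from rfl]
            rw [rep_neg _ _ _ _ (by decide) (by simp [List.isPrefixOf]),
                rep_neg _ _ _ _ (by decide) (by simp [List.isPrefixOf]),
                rep_neg _ _ _ _ (by decide) (by simp [List.isPrefixOf]),
                rep_neg _ _ _ _ (by decide) (by simp [List.isPrefixOf]),
                rep_neg _ _ _ _ (by decide) (by simp [List.isPrefixOf]),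
                ih t2 (by simp at hl; omega)]
            rfl
          · by_cases hr : ['r','i','g','h','t'].isPrefixOf (c :: t)
            · obtain ⟨t2, heq⟩ := List.isPrefixOf_iff_prefix.mp hr
              simp only [List.cons_append, List.nil_append, List.cons.injEq] at heq
              obtain ⟨h1, h2⟩ := heq
              subst h1; subst h2
              rw [scan3_cons _ _ (by simp [List.isPrefixOf]) (by simp [List.isPrefixOf])
                    (by simp [List.isPrefixOf]),
                  scan3_cons _ _ (by simp [List.isPrefixOf]) (by simp [List.isPrefixOf])
                    (by simp [List.isPrefixOf]),
                  scan3_cons _ _ (by simp [List.isPrefixOf]) (by simp [List.isPrefixOf])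
                    (by simp [List.isPrefixOf]),
                  scan3_cons _ _ (by simp [List.isPrefixOf]) (by simp [List.isPrefixOf])
                    (by simp [List.isPrefixOf]),
                  scan3_cons _ _ (by simp [List.isPrefixOf]) (by simp [List.isPrefixOf])
                    (by simp [List.isPrefixOf]),
                  rep_pos _ _ _ (by decide) (by simp [List.isPrefixOf])]
              simp only [List.length_cons, List.length_nil, List.drop_succ_cons, List.drop_zero]
              rw [ih t2 (by simp at hl; omega)]
              rfl
            · have hr' : ['r','i','g','h','t'].isPrefixOf (c :: scan3 t) = false := by
                rw [Bool.eq_false_iff]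
                intro hcon
                simp only [List.isPrefixOf, Bool.and_eq_true, beq_iff_eq] at hcon
                have := reflect3 t.length ['i','g','h','t'] t (Nat.le_refl _) (by simp) hcon.2
                apply hr
                simp only [List.isPrefixOf, Bool.and_eq_true, beq_iff_eq]
                exact ⟨hcon.1, this⟩
              rw [scan3_cons c t (Bool.eq_false_iff.mpr hd) (Bool.eq_false_iff.mpr hu)
                    (Bool.eq_false_iff.mpr hle),
                  rep_neg _ _ _ _ (by decide) hr',
                  ih t (by simp at hl; omega),
                  scanDirections_cons c t (Bool.eq_false_iff.mpr hd) (Bool.eq_false_iff.mpr hu)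
                    (Bool.eq_false_iff.mpr hle) (Bool.eq_false_iff.mpr hr)]

theorem ports_agree (bind : String) : alternate_directional_key bind = alternate_directional_key_alt bind := by
  unfold alternate_directional_key alternate_directional_key_alt
  cases hg : PySem.Str.isIn "alt" bind
  case true => simp
  case false =>
    simp only [Bool.not_false, if_pos trivial]
    show PySem.Str.replace (PySem.Str.replace (PySem.Str.replace (PySem.Str.replace bind "down" "alt+k") "up" "alt+i") "left" "alt+j") "right" "alt+l" = _
    simp only [PySem.Str.replace, String.toList_ofList]
    rw [show ("down".toList) = ['d','o','w','n'] from rfl,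
        show ("alt+k".toList) = ['a','l','t','+','k'] from rfl,
        show ("up".toList) = ['u','p'] from rfl,
        show ("alt+i".toList) = ['a','l','t','+','i'] from rfl,
        show ("left".toList) = ['l','e','f','t'] from rfl,
        show ("alt+j".toList) = ['a','l','t','+','j'] from rfl,
        show ("right".toList) = ['r','i','g','h','t'] from rfl,
        show ("alt+l".toList) = ['a','l','t','+','l'] from rfl,
        stage1 bind.toList.length bind.toList (Nat.le_refl _),
        stage2 bind.toList.length bind.toList (Nat.le_refl _),
        stage3 bind.toList.length bind.toList (Nat.le_refl _),
        stage4 bind.toList.length bind.toList (Nat.le_refl _)]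

-- ===== VERDICT (by name: the statement is the Claim_ definition above) =====
theorem alternate_directional_key_spec : Claim_equal_alternate_directional_key := by
  intro bind _
  unfold Spec_alternate_directional_key
  exact ports_agree bind
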